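-- pv_equiv track=rewrite | github.com/jsochacki/Google_Foo_Bar_Solutions | Paying_Henchman.py | answer
-- ===== SOURCE A (Python) =====
-- def answer(total_lambs):
--     try:
--         assert isinstance(total_lambs, int)
--     except AssertionError as e:
--         raise SystemExit('You need to enter and integer'
--                          'for this function to work')
--     else:
--         try:
--             assert ( 10 <= total_lambs <= 1000000000 )
--         except AssertionError as e:
--             raise SystemExit('This function only accepts integers'
--                              'between and including 10 and 10e9')
--
--     LAMS = total_lambs
--     level = 0
--     while int(total_lambs) >= 0:
--         total_lambs = int(total_lambs - (0b1 << level))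
--         if int(total_lambs) >= 0:
--             level = level + 1
--
--     least_henchmen = level
--
--     total_lambs = LAMS
--     level = 0
--     hench_pay = []
--     while int(total_lambs) >= 0:
--         if level >= 2:
--             hench_pay.extend([hench_pay[level - 2] + hench_pay[level - 1]])
--         else:
--             hench_pay.extend([1])
--         total_lambs = int(total_lambs - hench_pay[level])
--         if int(total_lambs) >= 0:
--             level = level + 1
--
--     most_henchmen = level
--
--     return (most_henchmen - least_henchmen)
-- ===== SOURCE B (Python) =====
-- def answer(total_lambs):
--     try:
--         assert isinstance(total_lambs, int)
--     except AssertionError as e: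
--         raise SystemExit('You need to enter and integer'
--                          'for this function to work')
--     else:
--         try:
--             assert ( 10 <= total_lambs <= 1000000000 )
--         except AssertionError as e:
--             raise SystemExit('This function only accepts integers'
--                              'between and including 10 and 10e9')
--
--     # least: largest k with 2^k - 1 <= total_lambs, in closed form
--     least_henchmen = (total_lambs + 1).bit_length() - 1
--
--     # most: largest k with F_1 + ... + F_k <= total_lambs (F = 1,1,2,3,...)
--     a, b = 1, 1
--     cum = 0
--     most_henchmen = 0
--     while cum + a <= total_lambs:
--         cum += a
--         a, b = b, a + b
--         most_henchmen += 1
--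
--     return most_henchmen - least_henchmen
-- ===== Notes on version B (the rewrite author's own statement) =====
-- stated objective: simpler
-- what changed: Replaces A's two subtract-until-negative loops (the second of which builds a growing Fibonacci list and indexes into it) by a closed-form bit_length computation for the geometric count and a constant-space two-variable Fibonacci cumulative scan.
import Mathlib
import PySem

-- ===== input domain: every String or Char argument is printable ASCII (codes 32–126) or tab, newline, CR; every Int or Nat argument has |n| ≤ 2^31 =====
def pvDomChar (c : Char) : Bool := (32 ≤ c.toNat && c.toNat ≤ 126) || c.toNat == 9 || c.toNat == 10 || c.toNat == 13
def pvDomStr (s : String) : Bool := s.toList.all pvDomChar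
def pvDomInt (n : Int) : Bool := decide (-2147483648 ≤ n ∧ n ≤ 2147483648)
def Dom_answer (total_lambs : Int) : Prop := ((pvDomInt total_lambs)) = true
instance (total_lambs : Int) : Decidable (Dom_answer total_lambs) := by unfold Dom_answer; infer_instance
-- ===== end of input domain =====

-- B replaces A's two subtract-until-negative loops by a closed-form bit_length for the
-- geometric count and a constant-space two-variable Fibonacci cumulative scan
-- (simpler: no growing list, no list indexing).

-- ===== PORT A =====
-- first while-loop of A: subtract 1,2,4,… while the remainder stays ≥ 0
def loop1A (t : Int) (level : Nat) : Nat :=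
  if 0 ≤ t then
    if 0 ≤ t - 2 ^ level then loop1A (t - 2 ^ level) (level + 1) else level
  else level
termination_by t.toNat
decreasing_by
  have hp : (0:Int) < 2 ^ level := pow_pos (by norm_num) _
  omega

-- second while-loop of A: build the Fibonacci list hench_pay and subtract its entries.
-- The `fuel` parameter only makes the loop total; every iteration inside Pre_ subtracts
-- at least 1, so fuel = t.toNat + 2 is never exhausted there.  List indexing hp[i]
-- is always in range in A (ported with getD; indices provably in range).
def loop2A (fuel : Nat) (t : Int) (level : Nat) (hp : List Int) : Nat :=
  match fuel with
  | 0 => level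
  | fuel + 1 =>
    if 0 ≤ t then
      let hp' := if 2 ≤ level
                 then hp ++ [hp.getD (level - 2) 0 + hp.getD (level - 1) 0]
                 else hp ++ [1]
      if 0 ≤ t - hp'.getD level 0 then loop2A fuel (t - hp'.getD level 0) (level + 1) hp'
      else level
    else level

def answer (total_lambs : Int) : Int :=
  let least_henchmen : Nat := loop1A total_lambs 0
  let most_henchmen : Nat := loop2A (total_lambs.toNat + 2) total_lambs 0 []
  (most_henchmen : Int) - (least_henchmen : Int)

-- ===== PORT B =====
-- B's while-loop: count Fibonacci terms while the cumulative sum stays ≤ total.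
-- fuel only makes the loop total (each iteration inside Pre_ raises cum by ≥ 1).
def fibCountB (fuel : Nat) (total cum a b : Int) (most : Nat) : Nat :=
  match fuel with
  | 0 => most
  | fuel + 1 =>
    if cum + a ≤ total then fibCountB fuel total (cum + a) b (a + b) (most + 1) else most

def answer_alt (total_lambs : Int) : Int :=
  let least_henchmen : Int := (PySem.Int.bitLength (total_lambs + 1) : Int) - 1
  let most_henchmen : Nat := fibCountB (total_lambs.toNat + 2) total_lambs 0 1 1 0
  (most_henchmen : Int) - least_henchmen

-- ===== PRECONDITION & SPEC =====
-- A raises SystemExit unless 10 ≤ total_lambs ≤ 1000000000; Pre_ is exactly that range.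
def Pre_answer (total_lambs : Int) : Prop := 10 ≤ total_lambs ∧ total_lambs ≤ 1000000000
instance (total_lambs : Int) : Decidable (Pre_answer total_lambs) := by unfold Pre_answer; infer_instance
def pvWitness_answer : Int := (143)

def Spec_answer (total_lambs : Int) (out : Int) : Prop := out = answer_alt total_lambs
instance (total_lambs : Int) (out : Int) : Decidable (Spec_answer total_lambs out) := by unfold Spec_answer; infer_instance

-- ===== CLAIM (what is proved, stated in full; the proofs are below) =====
def Claim_equal_answer : Prop := ∀ (total_lambs : Int), Dom_answer total_lambs → Pre_answer total_lambs → Spec_answer total_lambs (answer total_lambs)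

-- ===== LEMMAS AND PROOFS =====

-- loop1A's result m satisfies 2^m - 2^l ≤ t < 2^(m+1) - 2^l
theorem loop1A_bounds (t : Int) (l : Nat) (ht : 0 ≤ t) :
    (2:Int) ^ (loop1A t l) - 2 ^ l ≤ t ∧ t < 2 ^ (loop1A t l + 1) - 2 ^ l := by
  rw [loop1A]
  simp only [if_pos ht]
  by_cases h : 0 ≤ t - 2 ^ l
  · simp only [if_pos h]
    have ih := loop1A_bounds (t - 2 ^ l) (l + 1) h
    constructor
    · have := ih.1
      have hpow : (2:Int) ^ (l + 1) = 2 ^ l + 2 ^ l := by ring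
      omega
    · have := ih.2
      have hpow : (2:Int) ^ (l + 1) = 2 ^ l + 2 ^ l := by ring
      omega
  · simp only [if_neg h]
    constructor
    · omega
    · have hpow : (2:Int) ^ (l + 1) = 2 ^ l + 2 ^ l := by ring
      have hp : (0:Int) < 2 ^ l := pow_pos (by norm_num) _
      omega
termination_by t.toNat
decreasing_by
  have hp : (0:Int) < 2 ^ l := pow_pos (by norm_num) _
  omega

-- uniqueness of the exponent m with 2^m ≤ x < 2^(m+1)
theorem pow_sandwich_unique (m k : Nat) (x : Int)
    (h1 : (2:Int) ^ m ≤ x) (h2 : x < 2 ^ (m + 1))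
    (h3 : (2:Int) ^ k ≤ x) (h4 : x < 2 ^ (k + 1)) : m = k := by
  rcases lt_trichotomy m k with h | h | h
  · have hmono : (2:Int) ^ (m + 1) ≤ 2 ^ k := pow_le_pow_right₀ (by norm_num) h
    omega
  · exact h
  · have hmono : (2:Int) ^ (k + 1) ≤ 2 ^ m := pow_le_pow_right₀ (by norm_num) h
    omega

-- loop1A t 0 = bitLength (t+1) - 1 for 0 ≤ t
theorem loop1A_eq_bitLength (t : Int) (ht : 0 ≤ t) :
    (loop1A t 0 : Int) = (PySem.Int.bitLength (t + 1) : Int) - 1 := by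
  obtain ⟨hb1, hb2⟩ := loop1A_bounds t 0 ht
  have hne : t + 1 ≠ 0 := by omega
  have hub := PySem.Int.lt_two_pow_bitLength (t + 1)
  have hlb := PySem.Int.two_pow_bitLength_le (t + 1) hne
  generalize hL : PySem.Int.bitLength (t + 1) = L at hub hlb ⊢
  generalize hm : loop1A t 0 = m at hb1 hb2 ⊢
  have hLpos : 1 ≤ L := by
    rcases Nat.eq_zero_or_pos L with h | h
    · subst h
      have : (t + 1).natAbs < 1 := by simpa using hub
      omega
    · exact h
  have hc1 : ((2 ^ L : Nat) : Int) = (2:Int) ^ L := by push_cast; ring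
  have hc2 : ((2 ^ (L - 1) : Nat) : Int) = (2:Int) ^ (L - 1) := by push_cast; ring
  have hubI : t + 1 < (2:Int) ^ L := by omega
  have hlbI : (2:Int) ^ (L - 1) ≤ t + 1 := by omega
  have h0 : (2:Int) ^ 0 = 1 := pow_zero 2
  have hmeq : m = L - 1 := by
    apply pow_sandwich_unique m (L - 1) (t + 1)
    · omega
    · omega
    · exact hlbI
    · rw [show L - 1 + 1 = L by omega]; exact hubI
  omega

-- the invariant carried through A's Fibonacci loop, relating hp to B's (a, b)
def Inv2 (level : Nat) (hp : List Int) (a b : Int) : Prop :=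
  hp.length = level ∧ 1 ≤ a ∧ a ≤ b ∧
  (2 ≤ level → hp.getD (level - 2) 0 + hp.getD (level - 1) 0 = a) ∧
  (1 ≤ level → hp.getD (level - 1) 0 = b - a) ∧
  (level < 2 → a = 1) ∧ (level = 0 → b = 1)

theorem getD_append_last (hp : List Int) (x : Int) :
    (hp ++ [x]).getD hp.length 0 = x := by
  simp

theorem getD_append_lt (hp : List Int) (x : Int) (i : Nat) (h : i < hp.length) :
    (hp ++ [x]).getD i 0 = hp.getD i 0 := by
  rw [List.getD_append _ _ _ _ h]

-- A's list loop equals B's two-variable loop under the invariant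
theorem loop2A_eq_fibCountB (fuel : Nat) (T cum : Int) (level : Nat) (hp : List Int)
    (a b : Int) (hinv : Inv2 level hp a b) (ht : 0 ≤ T - cum) :
    loop2A fuel (T - cum) level hp = fibCountB fuel T cum a b level := by
  induction fuel generalizing cum level hp a b with
  | zero => rfl
  | succ fuel ih =>
    obtain ⟨hlen, ha1, hab, h2, h1, h0, hb0⟩ := hinv
    have happ : (if 2 ≤ level
                 then hp ++ [hp.getD (level - 2) 0 + hp.getD (level - 1) 0]
                 else hp ++ [1]) = hp ++ [a] := by
      by_cases hl : 2 ≤ level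
      · rw [if_pos hl, h2 hl]
      · rw [if_neg hl, h0 (by omega)]
    rw [loop2A, fibCountB]
    simp only [if_pos ht, happ]
    have hget : (hp ++ [a]).getD level 0 = a := by
      rw [← hlen]; exact getD_append_last hp a
    rw [hget]
    by_cases hc : 0 ≤ T - cum - a
    · rw [if_pos hc, if_pos (by omega : cum + a ≤ T)]
      have hinv' : Inv2 (level + 1) (hp ++ [a]) b (a + b) := by
        refine ⟨by simp [hlen], by omega, by omega, ?_, ?_, ?_, by omega⟩
        · intro hl2
          by_cases hl1 : 1 ≤ level
          · have e1 : (hp ++ [a]).getD (level + 1 - 2) 0 = hp.getD (level - 1) 0 := by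
              have he : level + 1 - 2 = level - 1 := by omega
              rw [he, getD_append_lt hp a _ (by omega)]
            have e2 : (hp ++ [a]).getD (level + 1 - 1) 0 = a := hget
            rw [e1, e2, h1 hl1]; ring
          · -- level = 0, so level + 1 = 1 and 2 ≤ level + 1 is false
            omega
        · intro _
          have e2 : (hp ++ [a]).getD (level + 1 - 1) 0 = a := hget
          rw [e2]; ring
        · intro hlt
          have : level = 0 := by omega
          have := hb0 this
          omega
      have := ih (cum + a) (level + 1) (hp ++ [a]) b (a + b) hinv' (by omega)
      have harg : T - (cum + a) = T - cum - a := by ring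
      rw [harg] at this
      exact this
    · rw [if_neg hc, if_neg (by omega : ¬ (cum + a ≤ T))]

-- ===== VERDICT (by name: the statement is the Claim_ definition above) =====
theorem answer_spec : Claim_equal_answer := by
  intro t _ hpre
  obtain ⟨h10, _⟩ := hpre
  have ht : 0 ≤ t := by omega
  have hinv : Inv2 0 [] 1 1 :=
    ⟨rfl, le_refl 1, le_refl 1, fun h => absurd h (by omega),
     fun h => absurd h (by omega), fun _ => rfl, fun _ => rfl⟩
  have hmost : loop2A (t.toNat + 2) t 0 [] = fibCountB (t.toNat + 2) t 0 1 1 0 := by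
    have := loop2A_eq_fibCountB (t.toNat + 2) t 0 0 [] 1 1 hinv (by omega)
    simpa using this
  unfold Spec_answer answer answer_alt
  simp only [hmost, loop1A_eq_bitLength t ht]
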